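-- pv_equiv track=rewrite | github.com/BugBuster-AI/bugbuster | backend/schemas.py | parse_format_pattern
-- ===== SOURCE A (Python) =====
-- from typing import Any, Dict, List, Literal, Optional, Tuple, Union
--
-- TOKEN_TO_STRFTIME = {
--     "YYYY": "%Y",
--     "YY": "%y",
--     "MM": "%m",
--     "DD": "%d",
--     "HH": "%H",
--     "mm": "%M",
--     "ss": "%S",
-- }
--
-- UNIX_TOKENS = {"X", "x"}  # это не strftime, обрабатываем отдельно (сек, миллисек)
--
-- FORMAT_TOKENS = list(TOKEN_TO_STRFTIME.keys()) + list(UNIX_TOKENS)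
--
-- ALLOWED_SEPARATORS = set("-.:_/ ")
--
-- def parse_format_pattern(pattern: str) -> Tuple[Optional[str], bool, bool]:
--     """мэппим на python format
--     возвращаем либо флаг unix timestamp, либо format для strftime
--     unix нельзя сочетать с strftime
--     """
--     i = 0
--     n = len(pattern)
--
--     is_unix_seconds = False
--     is_unix_millis = False
--     strftime_parts: list[str] = []
--
--     sorted_tokens = sorted(FORMAT_TOKENS, key=len, reverse=True)
--
--     while i < n:
--         matched_token = None
--
--         for token in sorted_tokens:
--             if pattern.startswith(token, i):
--                 matched_token = token
--                 break
--
--         if matched_token is not None: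
--             if matched_token in UNIX_TOKENS:
--                 if strftime_parts:
--                     raise ValueError(
--                         "Unix tokens 'X' or 'x' cannot be combined with other tokens"
--                     )
--                 if matched_token == "X":
--                     is_unix_seconds = True
--                 else:
--                     is_unix_millis = True
--                 i += len(matched_token)
--                 continue
--
--             strftime_parts.append(TOKEN_TO_STRFTIME[matched_token])
--             i += len(matched_token)
--             continue
--
--         ch = pattern[i]
--
--         if ch in ALLOWED_SEPARATORS:
--             strftime_parts.append(ch)
--             i += 1
--             continue
--
--         raise ValueError(
--             f"Invalid format pattern: unexpected character '{ch}' at position {i} in '{pattern}'"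
--         )
--
--     if is_unix_seconds or is_unix_millis:
--         return None, is_unix_seconds, is_unix_millis
--
--     if not strftime_parts:
--         raise ValueError("Format pattern must contain at least one token")
--
--     return "".join(strftime_parts), False, False
-- ===== SOURCE B (Python) =====
-- from itertools import groupby
--
-- LETTER_CODE = {"M": "%m", "D": "%d", "H": "%H", "m": "%M", "s": "%S"}
-- SEPARATOR_CHARS = set("-.:_/ ")
--
--
-- def parse_format_pattern(pattern):
--     """Run-length version: group the pattern into maximal runs of equal
--     characters and translate each run at once (Y-runs via div/mod 4,
--     other letter runs via div 2, separator runs verbatim)."""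
--     is_unix_seconds = False
--     is_unix_millis = False
--     strftime_parts = []
--     pos = 0
--     for ch, grp in groupby(pattern):
--         length = sum(1 for _ in grp)
--         if ch in ("X", "x"):
--             if strftime_parts:
--                 raise ValueError(
--                     "Unix tokens 'X' or 'x' cannot be combined with other tokens"
--                 )
--             if ch == "X":
--                 is_unix_seconds = True
--             else:
--                 is_unix_millis = True
--         elif ch in SEPARATOR_CHARS:
--             strftime_parts.append(ch * length)
--         elif ch == "Y":
--             if length % 2 == 1:
--                 raise ValueError(
--                     f"Invalid format pattern: unexpected character 'Y' at position {pos + length - 1} in '{pattern}'"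
--                 )
--             strftime_parts.append("%Y" * (length // 4) + ("%y" if length % 4 != 0 else ""))
--         elif ch in LETTER_CODE:
--             if length % 2 == 1:
--                 raise ValueError(
--                     f"Invalid format pattern: unexpected character '{ch}' at position {pos + length - 1} in '{pattern}'"
--                 )
--             strftime_parts.append(LETTER_CODE[ch] * (length // 2))
--         else:
--             raise ValueError(
--                 f"Invalid format pattern: unexpected character '{ch}' at position {pos} in '{pattern}'"
--             )
--         pos += length
--     if is_unix_seconds or is_unix_millis:
--         return None, is_unix_seconds, is_unix_millis
--     if not strftime_parts:
--         raise ValueError("Format pattern must contain at least one token")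
--     return "".join(strftime_parts), False, False
-- ===== Notes on version B (the rewrite author's own statement) =====
-- stated objective: alternative
-- what changed: Replaces the per-position greedy scan over a sorted token list with a run-length pass: the pattern is grouped into maximal runs of equal characters and each run is translated at once (Y-runs by div/mod 4, other letter runs by div 2, separator runs verbatim, unix runs set a flag once).
import Mathlib
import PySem

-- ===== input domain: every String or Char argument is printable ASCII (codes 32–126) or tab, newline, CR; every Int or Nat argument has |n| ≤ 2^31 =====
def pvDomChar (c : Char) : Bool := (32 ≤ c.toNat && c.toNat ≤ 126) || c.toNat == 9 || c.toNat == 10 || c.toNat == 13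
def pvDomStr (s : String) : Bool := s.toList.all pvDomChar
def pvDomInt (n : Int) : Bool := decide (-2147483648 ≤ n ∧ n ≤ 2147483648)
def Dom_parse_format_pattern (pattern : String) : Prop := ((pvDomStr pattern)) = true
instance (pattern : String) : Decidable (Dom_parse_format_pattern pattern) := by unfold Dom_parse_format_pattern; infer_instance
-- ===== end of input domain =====

-- B replaces A's per-position greedy scan over a sorted token list by a run-length pass over
-- maximal runs of equal characters (itertools.groupby); same return value wherever A returns
-- normally (inputs on which A raises ValueError are excluded by Pre_).

-- ===== PORT A =====
def pvTokensA : List (List Char) :=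
  [['Y','Y','Y','Y'], ['Y','Y'], ['M','M'], ['D','D'], ['H','H'], ['m','m'], ['s','s'], ['X'], ['x']]
def pvFindTok (rest : List Char) : Option (List Char) :=
  pvTokensA.find? (fun t => t.isPrefixOf rest)


def pvStrf : List Char → List Char
  | ['Y','Y','Y','Y'] => ['%','Y']
  | ['Y','Y'] => ['%','y']
  | ['M','M'] => ['%','m']
  | ['D','D'] => ['%','d']
  | ['H','H'] => ['%','H']
  | ['m','m'] => ['%','M']
  | ['s','s'] => ['%','S']
  | _ => []

def pvSeps : List Char := ['-', '.', ':', '_', '/', ' ']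

theorem pvFindTok_ne_nil {rest t : List Char} (h : pvFindTok rest = some t) : t ≠ [] := by
  have hm := List.mem_of_find?_eq_some h
  simp only [pvTokensA, List.mem_cons, List.not_mem_nil, or_false] at hm
  rcases hm with h|h|h|h|h|h|h|h|h <;> subst h <;> simp

def pvLoopA : List Char → Bool → Bool → List (List Char) → Option (Bool × Bool × List (List Char))
  | [], s, m, parts => some (s, m, parts)
  | c :: cs, s, m, parts =>
    match h : pvFindTok (c :: cs) with
    | some tok =>
      if tok = ['X'] ∨ tok = ['x'] then
        if parts ≠ [] then none
        else pvLoopA ((c :: cs).drop tok.length) (s || (tok = ['X'])) (m || (tok = ['x'])) parts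
      else pvLoopA ((c :: cs).drop tok.length) s m (parts ++ [pvStrf tok])
    | none =>
      if c ∈ pvSeps then pvLoopA cs s m (parts ++ [[c]])
      else none
  termination_by rest => rest.length
  decreasing_by
  · have h1 := pvFindTok_ne_nil h
    have : 0 < tok.length := List.length_pos_iff.mpr h1
    simp only [List.length_drop]; simp only [List.length_cons]; omega
  · have h1 := pvFindTok_ne_nil h
    have : 0 < tok.length := List.length_pos_iff.mpr h1
    simp only [List.length_drop]; simp only [List.length_cons]; omega
  · simp

def parse_format_pattern (pattern : String) : Option String × Bool × Bool :=
  match pvLoopA pattern.toList false false [] with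
  | none => (none, false, false)      -- the loop raised ValueError (outside Pre_)
  | some (s, m, parts) =>
    if s || m then (none, s, m)
    else if parts.isEmpty then (none, false, false)   -- "at least one token" ValueError (outside Pre_)
    else (some (String.ofList parts.flatten), false, false)

-- ===== PORT B =====
def pvLetterCode : Char → Option (List Char)
  | 'M' => some ['%','m']
  | 'D' => some ['%','d']
  | 'H' => some ['%','H']
  | 'm' => some ['%','M']
  | 's' => some ['%','S']
  | _ => none

-- itertools.groupby(pattern): the maximal runs of equal characters, via the library function
def pvRuns (l : List Char) : List (List Char) := List.splitBy (· == ·) l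

-- the for-loop of B over the runs; `none` = B raises ValueError
def pvLoopB : List (List Char) → Bool → Bool → List (List Char) → Option (Bool × Bool × List (List Char))
  | [], s, m, parts => some (s, m, parts)
  | run :: rs, s, m, parts =>
    match run with
    | [] => none   -- unreachable: groupby yields nonempty runs
    | c :: tl =>
      let k := (c :: tl).length
      if c = 'X' ∨ c = 'x' then
        if parts ≠ [] then none
        else pvLoopB rs (s || (c == 'X')) (m || (c == 'x')) parts
      else if c ∈ pvSeps then pvLoopB rs s m (parts ++ [List.replicate k c])
      else if c = 'Y' then
        if k % 2 = 1 then none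
        else pvLoopB rs s m
          (parts ++ [(List.replicate (k / 4) ['%','Y']).flatten ++ (if k % 4 ≠ 0 then ['%','y'] else [])])
      else
        match pvLetterCode c with
        | some cd => if k % 2 = 1 then none else pvLoopB rs s m (parts ++ [(List.replicate (k / 2) cd).flatten])
        | none => none

def parse_format_pattern_alt (pattern : String) : Option String × Bool × Bool :=
  match pvLoopB (pvRuns pattern.toList) false false [] with
  | none => (none, false, false)
  | some (s, m, parts) =>
    if s || m then (none, s, m)
    else if parts.isEmpty then (none, false, false)
    else (some (String.ofList parts.flatten), false, false)

-- ===== PRECONDITION & SPEC =====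
def pvLetters : List Char := ['Y', 'M', 'D', 'H', 'm', 's']

-- Pre_ = exactly the inputs on which the Python A returns (no ValueError): nonempty pattern,
-- only token/separator characters, every maximal run of a strftime letter has even length,
-- and the unix characters X/x (if any) form a prefix of the pattern.
def Pre_parse_format_pattern (pattern : String) : Prop :=
  pattern.toList ≠ [] ∧
  (pattern.toList.all (fun c => pvLetters.contains c || pvSeps.contains c || c == 'X' || c == 'x')) ∧
  (∀ r ∈ List.splitBy (· == ·) pattern.toList, r.headD ' ' ∈ pvLetters → r.length % 2 = 0) ∧
  ((pattern.toList.dropWhile (fun c => c == 'X' || c == 'x')).all (fun c => ¬(c = 'X' ∨ c = 'x')))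
instance (pattern : String) : Decidable (Pre_parse_format_pattern pattern) := by
  unfold Pre_parse_format_pattern; infer_instance

def pvWitness_parse_format_pattern : String := "YYYY-MM-DD"

def Spec_parse_format_pattern (pattern : String) (out : Option String × Bool × Bool) : Prop := out = parse_format_pattern_alt pattern
instance (pattern : String) (out : Option String × Bool × Bool) : Decidable (Spec_parse_format_pattern pattern out) := by unfold Spec_parse_format_pattern; infer_instance

-- ===== CLAIM (what is proved, stated in full; the proofs are below) =====
def Claim_equal_parse_format_pattern : Prop := ∀ (pattern : String), Dom_parse_format_pattern pattern → Pre_parse_format_pattern pattern → Spec_parse_format_pattern pattern (parse_format_pattern pattern)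

-- ===== LEMMAS AND PROOFS =====

theorem pvBeqF {c y : Char} (h : ¬ y = c) : (c == y) = false := by
  simp only [beq_eq_false_iff_ne, ne_eq]; exact fun e => h e.symm

theorem findX (ys : List Char) : pvFindTok ('X' :: ys) = some ['X'] := by
  simp [pvFindTok, pvTokensA, List.find?, List.isPrefixOf]

theorem find2 (c : Char) (hc : c ∈ ['M','D','H','m','s']) (ys : List Char) :
    pvFindTok (c :: c :: ys) = some [c, c] := by
  simp only [List.mem_cons, List.not_mem_nil, or_false] at hc
  rcases hc with rfl|rfl|rfl|rfl|rfl <;> simp [pvFindTok, pvTokensA, List.find?, List.isPrefixOf]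

theorem find1_none (c : Char) (hc : c ∈ ['M','D','H','m','s']) (ys : List Char)
    (h : ys.head? ≠ some c) : pvFindTok (c :: ys) = none := by
  simp only [List.mem_cons, List.not_mem_nil, or_false] at hc
  cases ys with
  | nil => rcases hc with rfl|rfl|rfl|rfl|rfl <;> simp [pvFindTok, pvTokensA, List.find?, List.isPrefixOf]
  | cons y t =>
    simp only [List.head?_cons, ne_eq, Option.some.injEq] at h
    rcases hc with rfl|rfl|rfl|rfl|rfl <;>
      simp [pvFindTok, pvTokensA, List.find?, List.isPrefixOf, pvBeqF h]

theorem findYYYY (ys : List Char) : pvFindTok ('Y'::'Y'::'Y'::'Y'::ys) = some ['Y','Y','Y','Y'] := by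
  simp [pvFindTok, pvTokensA, List.find?, List.isPrefixOf]

theorem findYY (ys : List Char) (h : ['Y','Y'].isPrefixOf ys = false) :
    pvFindTok ('Y'::'Y'::ys) = some ['Y','Y'] := by
  simp [pvFindTok, pvTokensA, List.find?, List.isPrefixOf, h]

theorem findY1 (ys : List Char) (h : ys.head? ≠ some 'Y') : pvFindTok ('Y'::ys) = none := by
  cases ys with
  | nil => simp [pvFindTok, pvTokensA, List.find?, List.isPrefixOf]
  | cons y t =>
    simp only [List.head?_cons, ne_eq, Option.some.injEq] at h
    simp [pvFindTok, pvTokensA, List.find?, List.isPrefixOf, pvBeqF h]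

theorem find_none (c : Char) (hc : c ∉ (['Y','M','D','H','m','s','X','x'] : List Char)) (ys : List Char) :
    pvFindTok (c :: ys) = none := by
  simp only [List.mem_cons, List.not_mem_nil, or_false, not_or] at hc
  obtain ⟨h1,h2,h3,h4,h5,h6,h7,h8⟩ := hc
  simp [pvFindTok, pvTokensA, List.find?, List.isPrefixOf,
    pvBeqF h1, pvBeqF h2, pvBeqF h3, pvBeqF h4, pvBeqF h5, pvBeqF h6, pvBeqF h7, pvBeqF h8]

-- X-run
theorem loopA_X_run : ∀ k, 0 < k → ∀ (rest' : List Char) (s m : Bool) (p : List (List Char)),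
    pvLoopA (List.replicate k 'X' ++ rest') s m p =
      if p = [] then pvLoopA rest' true m p else none := by
  intro k
  induction k with
  | zero => omega
  | succ k ih =>
    intro _ rest' s m p
    rw [List.replicate_succ, List.cons_append, pvLoopA.eq_2]
    split
    next tok heq =>
      rw [findX] at heq
      obtain rfl : tok = ['X'] := (Option.some.inj heq).symm
      by_cases hp : p = []
      · subst hp
        simp only [if_pos (Or.inl rfl), ne_eq, not_true_eq_false, if_neg, List.length_cons,
          List.length_nil, Nat.zero_add, List.drop_one, List.tail_cons, reduceIte]
        rcases Nat.eq_zero_or_pos k with rfl|hk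
        · simp
        · have := ih hk rest' true m []
          simp only [if_pos rfl] at this
          simpa using this
      · simp [hp]
    next heq => rw [findX] at heq; cases heq

theorem loopA_x_run : ∀ k, 0 < k → ∀ (rest' : List Char) (s m : Bool) (p : List (List Char)),
    pvLoopA (List.replicate k 'x' ++ rest') s m p =
      if p = [] then pvLoopA rest' s true p else none := by
  intro k
  induction k with
  | zero => omega
  | succ k ih =>
    intro _ rest' s m p
    have findx : ∀ ys, pvFindTok ('x' :: ys) = some ['x'] := by
      intro ys; simp [pvFindTok, pvTokensA, List.find?, List.isPrefixOf]
    rw [List.replicate_succ, List.cons_append, pvLoopA.eq_2]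
    split
    next tok heq =>
      rw [findx] at heq
      obtain rfl : tok = ['x'] := (Option.some.inj heq).symm
      by_cases hp : p = []
      · subst hp
        simp only [if_pos (Or.inr rfl), ne_eq, not_true_eq_false, if_neg, List.length_cons,
          List.length_nil, Nat.zero_add, List.drop_one, List.tail_cons, reduceIte]
        rcases Nat.eq_zero_or_pos k with rfl|hk
        · simp
        · have := ih hk rest' s true []
          simp only [if_pos rfl] at this
          simpa using this
      · simp [hp]
    next heq => rw [findx] at heq; cases heq

theorem sep_find_none (c : Char) (hc : c ∈ pvSeps) (ys : List Char) :
    pvFindTok (c :: ys) = none := by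
  apply find_none
  simp only [pvSeps, List.mem_cons, List.not_mem_nil, or_false] at hc
  rcases hc with rfl|rfl|rfl|rfl|rfl|rfl <;> decide

theorem loopA_sep_run (c : Char) (hc : c ∈ pvSeps) :
    ∀ (k : Nat) (rest' : List Char) (s m : Bool) (p : List (List Char)),
    pvLoopA (List.replicate k c ++ rest') s m p = pvLoopA rest' s m (p ++ List.replicate k [c]) := by
  intro k
  induction k with
  | zero => intro rest' s m p; simp
  | succ k ih =>
    intro rest' s m p
    rw [List.replicate_succ, List.cons_append, pvLoopA.eq_2]
    split
    next tok heq => rw [sep_find_none c hc] at heq; cases heq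
    next heq =>
      rw [if_pos hc, ih]
      congr 1
      simp [List.replicate_succ]

theorem loopA_letter_run (c : Char) (hc : c ∈ ['M','D','H','m','s']) (cd : List Char)
    (hstrf : pvStrf [c, c] = cd) :
    ∀ (k : Nat) (rest' : List Char), rest'.head? ≠ some c → ∀ (s m : Bool) (p : List (List Char)),
    pvLoopA (List.replicate k c ++ rest') s m p =
      if k % 2 = 1 then none else pvLoopA rest' s m (p ++ List.replicate (k / 2) cd) := by
  intro k
  induction k using Nat.strong_induction_on with
  | _ k ih =>
    obtain _|(_|k) := k
    · intro rest' _ s m p; simp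
    · intro rest' hr s m p
      rw [List.replicate_succ, List.replicate_zero, List.singleton_append, pvLoopA.eq_2]
      split
      next tok heq => rw [find1_none c hc rest' hr] at heq; cases heq
      next heq =>
        have hns : c ∉ pvSeps := by
          simp only [List.mem_cons, List.not_mem_nil, or_false] at hc
          rcases hc with rfl|rfl|rfl|rfl|rfl <;> decide
        simp [hns]
    · intro rest' hr s m p
      have hsplit : List.replicate (k + 2) c ++ rest' = c :: c :: (List.replicate k c ++ rest') := by
        simp [List.replicate_succ]
      rw [hsplit, pvLoopA.eq_2]
      split
      next tok heq =>
        rw [find2 c hc] at heq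
        obtain rfl : tok = [c, c] := (Option.some.inj heq).symm
        have hone : ¬([c, c] = ['X'] ∨ [c, c] = ['x']) := by simp
        rw [if_neg hone]
        simp only [List.length_cons, List.length_nil, List.drop_succ_cons, List.drop_zero,
          List.drop_one, List.tail_cons]
        rw [ih k (by omega) rest' hr]
        have h2 : (k + 2) % 2 = k % 2 := by omega
        rw [h2]
        by_cases hk : k % 2 = 1
        · simp [hk]
        · rw [if_neg hk, if_neg hk]
          congr 1
          rw [hstrf]
          have : (k + 2) / 2 = k / 2 + 1 := by omega
          rw [this, List.replicate_succ]
          simp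
      next heq => rw [find2 c hc] at heq; cases heq

theorem loopA_Y_run :
    ∀ (k : Nat) (rest' : List Char), rest'.head? ≠ some 'Y' → ∀ (s m : Bool) (p : List (List Char)),
    pvLoopA (List.replicate k 'Y' ++ rest') s m p =
      if k % 2 = 1 then none
      else pvLoopA rest' s m
        (p ++ List.replicate (k / 4) ['%','Y'] ++ (if k % 4 = 2 then [['%','y']] else [])) := by
  intro k
  induction k using Nat.strong_induction_on with
  | _ k ih =>
    have hYYpre : ∀ (ys : List Char), ys.head? ≠ some 'Y' → (['Y','Y'].isPrefixOf ys) = false := by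
      intro ys h
      cases ys with
      | nil => rfl
      | cons y t =>
        simp only [List.head?_cons, ne_eq, Option.some.injEq] at h
        simp [List.isPrefixOf, pvBeqF h]
    obtain _|(_|(_|(_|k))) := k
    · intro rest' _ s m p; simp
    · -- k = 1
      intro rest' hr s m p
      rw [show List.replicate 1 'Y' ++ rest' = 'Y' :: rest' from by simp, pvLoopA.eq_2]
      split
      next tok heq => rw [findY1 rest' hr] at heq; cases heq
      next heq => simp [pvSeps]
    · -- k = 2
      intro rest' hr s m p
      rw [show List.replicate 2 'Y' ++ rest' = 'Y' :: 'Y' :: rest' from by simp [List.replicate_succ],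
        pvLoopA.eq_2]
      split
      next tok heq =>
        rw [findYY rest' (hYYpre rest' hr)] at heq
        obtain rfl : tok = ['Y','Y'] := (Option.some.inj heq).symm
        have hone : ¬((['Y','Y'] : List Char) = ['X'] ∨ (['Y','Y'] : List Char) = ['x']) := by simp
        rw [if_neg hone]
        norm_num
        rfl
      next heq => rw [findYY rest' (hYYpre rest' hr)] at heq; cases heq
    · -- k = 3
      intro rest' hr s m p
      rw [show List.replicate 3 'Y' ++ rest' = 'Y' :: 'Y' :: 'Y' :: rest' from by simp [List.replicate_succ],
        pvLoopA.eq_2]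
      split
      next tok heq =>
        have hpre : (['Y','Y'].isPrefixOf ('Y' :: rest')) = false := by
          cases rest' with
          | nil => rfl
          | cons y t =>
            simp only [List.head?_cons, ne_eq, Option.some.injEq] at hr
            simp [List.isPrefixOf, pvBeqF hr]
        rw [findYY ('Y' :: rest') hpre] at heq
        obtain rfl : tok = ['Y','Y'] := (Option.some.inj heq).symm
        have hone : ¬((['Y','Y'] : List Char) = ['X'] ∨ (['Y','Y'] : List Char) = ['x']) := by simp
        rw [if_neg hone]
        rw [show List.drop (['Y','Y'] : List Char).length ('Y' :: 'Y' :: 'Y' :: rest') = 'Y' :: rest' from rfl]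
        rw [pvLoopA.eq_2]
        split
        next tok2 heq2 => rw [findY1 rest' hr] at heq2; cases heq2
        next heq2 => simp [pvSeps]
      next heq =>
        have hpre : (['Y','Y'].isPrefixOf ('Y' :: rest')) = false := by
          cases rest' with
          | nil => rfl
          | cons y t =>
            simp only [List.head?_cons, ne_eq, Option.some.injEq] at hr
            simp [List.isPrefixOf, pvBeqF hr]
        rw [findYY ('Y' :: rest') hpre] at heq; cases heq
    · -- k + 4
      intro rest' hr s m p
      have hsplit : List.replicate (k + 4) 'Y' ++ rest' =
          'Y' :: 'Y' :: 'Y' :: 'Y' :: (List.replicate k 'Y' ++ rest') := by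
        simp [List.replicate_succ]
      rw [hsplit, pvLoopA.eq_2]
      split
      next tok heq =>
        rw [findYYYY] at heq
        obtain rfl : tok = ['Y','Y','Y','Y'] := (Option.some.inj heq).symm
        have hone : ¬((['Y','Y','Y','Y'] : List Char) = ['X'] ∨ (['Y','Y','Y','Y'] : List Char) = ['x']) := by simp
        rw [if_neg hone]
        rw [show List.drop (['Y','Y','Y','Y'] : List Char).length
            ('Y' :: 'Y' :: 'Y' :: 'Y' :: (List.replicate k 'Y' ++ rest')) = List.replicate k 'Y' ++ rest' from rfl]
        rw [ih k (by omega) rest' hr]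
        have h2 : (k + 4) % 2 = k % 2 := by omega
        have h4 : (k + 4) % 4 = k % 4 := by omega
        have hd : (k + 4) / 4 = k / 4 + 1 := by omega
        rw [h2, h4, hd]
        by_cases hk : k % 2 = 1
        · simp [hk]
        · rw [if_neg hk, if_neg hk]
          congr 1
          rw [List.replicate_succ, pvStrf]
          simp
      next heq => rw [findYYYY] at heq; cases heq

theorem loopA_bad (c : Char) (hc : c ∉ (['Y','M','D','H','m','s','X','x'] : List Char))
    (hs : c ∉ pvSeps) (cs : List Char) (s m : Bool) (p : List (List Char)) :
    pvLoopA (c :: cs) s m p = none := by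
  rw [pvLoopA.eq_2]
  split
  next tok heq => rw [find_none c hc] at heq; cases heq
  next heq => rw [if_neg hs]

def pvRelO : Option (Bool × Bool × List (List Char)) → Option (Bool × Bool × List (List Char)) → Prop
  | none, none => True
  | some (s1, m1, p), some (s2, m2, q) => s1 = s2 ∧ m1 = m2 ∧ p.flatten = q.flatten ∧ (p = [] ↔ q = [])
  | _, _ => False

theorem takeWhile_eq_replicate (c : Char) (cs : List Char) :
    cs.takeWhile (· == c) = List.replicate (cs.takeWhile (· == c)).length c := by
  apply List.eq_replicate_length.mpr
  intro b hb
  have := List.mem_takeWhile_imp hb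
  simpa [beq_iff_eq] using this

theorem head?_dropWhile_ne (c : Char) (cs : List Char) :
    (cs.dropWhile (· == c)).head? ≠ some c := by
  induction cs with
  | nil => simp
  | cons y t ih =>
    by_cases h : y = c
    · simpa [List.dropWhile, h] using ih
    · have hb : (y == c) = false := beq_eq_false_iff_ne.mpr h
      simp [List.dropWhile, hb, h]

theorem flatten_replicate_singleton (k : Nat) (c : Char) :
    (List.replicate k ([c] : List Char)).flatten = List.replicate k c := by
  induction k with
  | zero => rfl
  | succ k ih => simp [List.replicate_succ, ih]

theorem chain_of_const (c : Char) : ∀ (l : List Char), (∀ x ∈ l, x = c) →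
    l.IsChain (fun x y => x == y) := by
  intro l
  induction l with
  | nil => intro _; exact .nil
  | cons a t iht =>
    intro h
    cases t with
    | nil => exact .singleton _
    | cons b u =>
      refine .cons (iht fun x hx => h x (List.mem_cons_of_mem _ hx)) (fun y hy => ?_)
      have ha := h a (by simp)
      have hb := h b (by simp)
      obtain rfl : b = y := by simpa using hy
      simp [ha, hb]


theorem runs_cons (c : Char) (cs : List Char) :
    List.splitBy (· == ·) (c :: cs) =
      (c :: cs.takeWhile (· == c)) :: List.splitBy (· == ·) (cs.dropWhile (· == c)) := by
  have hall : ∀ x ∈ c :: cs.takeWhile (· == c), x = c := by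
    intro x hx
    rcases List.mem_cons.mp hx with rfl | hx
    · rfl
    · simpa [beq_iff_eq] using List.mem_takeWhile_imp hx
  have h1 : c :: cs = (c :: cs.takeWhile (· == c)) ++ cs.dropWhile (· == c) := by
    rw [List.cons_append, List.takeWhile_append_dropWhile]
  have hside : ∀ x ∈ (c :: cs.takeWhile (· == c)).getLast?,
      ∀ y ∈ (cs.dropWhile (· == c)).head?, (x == y) = false := by
    intro x hx y hy
    have hxc : x = c := hall x (List.mem_of_mem_getLast? hx)
    have hne := head?_dropWhile_ne c cs
    have hyc : y ≠ c := fun e => hne (e ▸ hy)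
    rw [hxc]
    exact pvBeqF hyc
  rw [h1, List.splitBy_append hside]
  rw [List.splitBy_of_isChain (by simp) (chain_of_const c _ hall)]
  rfl

theorem main_rel_aux : ∀ (n : Nat) (rest : List Char), rest.length ≤ n →
    ∀ (s m : Bool) (p q : List (List Char)),
    p.flatten = q.flatten → (p = [] ↔ q = []) →
    pvRelO (pvLoopA rest s m p) (pvLoopB (pvRuns rest) s m q) := by
  intro n
  induction n with
  | zero =>
    intro rest hle s m p q h1 h2
    obtain rfl : rest = [] := List.eq_nil_of_length_eq_zero (by omega)
    rw [pvLoopA.eq_1]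
    show pvRelO (some (s, m, p)) (pvLoopB [] s m q)
    exact ⟨rfl, rfl, h1, h2⟩
  | succ n ih =>
  intro rest hle
  match rest with
  | [] =>
    intro s m p q h1 h2
    rw [pvLoopA.eq_1]
    show pvRelO (some (s, m, p)) (pvLoopB [] s m q)
    exact ⟨rfl, rfl, h1, h2⟩
  | c :: cs =>
    intro s m p q h1 h2
    have hcsn : cs.length ≤ n := by simp only [List.length_cons] at hle; omega
    set t := cs.takeWhile (· == c) with ht
    set d := cs.dropWhile (· == c) with hd
    have hdl : d.length ≤ cs.length := List.length_dropWhile_le _ _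
    have hdn : d.length ≤ n := le_trans hdl hcsn
    have hrun : c :: cs = List.replicate (t.length + 1) c ++ d := by
      rw [List.replicate_succ, List.cons_append]
      congr 1
      rw [ht, hd, ← takeWhile_eq_replicate]
      exact (List.takeWhile_append_dropWhile).symm
    have hdh : d.head? ≠ some c := head?_dropWhile_ne c cs
    have hruns : pvRuns (c :: cs) = (c :: t) :: pvRuns d := by
      rw [ht, hd]
      exact runs_cons c cs
    have htr : (c :: t).length = t.length + 1 := by simp
    rw [hruns, hrun]
    by_cases hX : c = 'X'
    · subst hX
      rw [loopA_X_run _ (by omega) d]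
      rw [pvLoopB]
      simp only [htr, if_pos (Or.inl rfl)]
      by_cases hp : p = []
      · have hq : q = [] := h2.mp hp
        rw [if_pos hp]
        simp only [hq, ne_eq, not_true_eq_false, if_neg, reduceIte]
        subst hp hq
        have := ih d hdn true m [] [] rfl Iff.rfl
        simpa using this
      · have hq : q ≠ [] := fun e => hp (h2.mpr e)
        rw [if_neg hp, if_pos hq]
        trivial
    · by_cases hx : c = 'x'
      · subst hx
        rw [loopA_x_run _ (by omega) d]
        rw [pvLoopB]
        simp only [htr, if_pos (Or.inr rfl)]
        by_cases hp : p = []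
        · have hq : q = [] := h2.mp hp
          rw [if_pos hp]
          simp only [hq, ne_eq, not_true_eq_false, if_neg, reduceIte]
          subst hp hq
          have := ih d hdn s true [] [] rfl Iff.rfl
          simpa using this
        · have hq : q ≠ [] := fun e => hp (h2.mpr e)
          rw [if_neg hp, if_pos hq]
          trivial
      · by_cases hsep : c ∈ pvSeps
        · rw [loopA_sep_run c hsep]
          rw [pvLoopB]
          have hone : ¬(c = 'X' ∨ c = 'x') := by simp [hX, hx]
          simp only [htr, if_neg hone, if_pos hsep]
          apply ih d hdn
          · simp [h1, flatten_replicate_singleton]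
          · constructor <;> intro h <;> simp at h
        · by_cases hY : c = 'Y'
          · subst hY
            rw [loopA_Y_run _ d hdh]
            rw [pvLoopB]
            have hone : ¬(('Y':Char) = 'X' ∨ ('Y':Char) = 'x') := by decide
            have hnsep : ('Y':Char) ∉ pvSeps := by decide
            simp only [htr, if_neg hone, if_neg hnsep, if_pos rfl]
            by_cases hk : (t.length + 1) % 2 = 1
            · rw [if_pos hk, if_pos hk]; trivial
            · rw [if_neg hk, if_neg hk]
              apply ih d hdn
              · simp only [List.flatten_append, h1]
                by_cases h4 : (t.length + 1) % 4 = 2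
                · rw [if_pos h4, if_pos (by omega : (t.length + 1) % 4 ≠ 0)]
                  simp
                · have h40 : (t.length + 1) % 4 = 0 := by omega
                  rw [if_neg h4, if_neg (by omega : ¬ (t.length + 1) % 4 ≠ 0)]
                  simp
              · constructor <;> intro h <;> simp at h
                · rcases h with ⟨_, h3, h4⟩
                  exfalso
                  by_cases h5 : (t.length + 1) % 4 = 2
                  · exact (h4 h5).elim
                  · have : (t.length + 1) % 4 = 0 := by omega
                    have : 4 ≤ t.length + 1 := by omega
                    have : 1 ≤ (t.length + 1) / 4 := by omega
                    omega
          · match hcode : pvLetterCode c with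
            | some cd =>
              have hcm : c ∈ ['M','D','H','m','s'] ∧ pvStrf [c, c] = cd ∧ cd ≠ [] := by
                unfold pvLetterCode at hcode
                split at hcode <;> simp_all <;> simp [pvStrf, ← hcode]
              rw [loopA_letter_run c hcm.1 cd hcm.2.1 _ d hdh]
              rw [pvLoopB]
              have hone : ¬(c = 'X' ∨ c = 'x') := by simp [hX, hx]
              simp only [htr, if_neg hone, if_neg hsep, if_neg hY, hcode]
              by_cases hk : (t.length + 1) % 2 = 1
              · rw [if_pos hk, if_pos hk]; trivial
              · rw [if_neg hk, if_neg hk]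
                apply ih d hdn
                · simp [h1]
                · constructor
                  · intro h
                    exfalso
                    have hne : (t.length + 1) / 2 ≠ 0 := by omega
                    simp [hne, hcm.2.2] at h
                  · intro h
                    simp at h
            | none =>
              have hcm : c ∉ (['Y','M','D','H','m','s','X','x'] : List Char) := by
                intro hmem
                simp only [List.mem_cons, List.not_mem_nil, or_false] at hmem
                rcases hmem with rfl|rfl|rfl|rfl|rfl|rfl|rfl|rfl <;> simp_all [pvLetterCode]
              rw [show List.replicate (t.length + 1) c ++ d = c :: (List.replicate t.length c ++ d) from by
                rw [List.replicate_succ, List.cons_append]]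
              rw [loopA_bad c hcm hsep]
              rw [pvLoopB]
              have hone : ¬(c = 'X' ∨ c = 'x') := by simp [hX, hx]
              simp only [if_neg hone, if_neg hsep, if_neg hY, hcode]
              trivial

theorem ports_agree (pattern : String) :
    parse_format_pattern pattern = parse_format_pattern_alt pattern := by
  have h := main_rel_aux pattern.toList.length pattern.toList le_rfl false false [] [] rfl Iff.rfl
  unfold parse_format_pattern parse_format_pattern_alt
  cases ha : pvLoopA pattern.toList false false [] with
  | none =>
    cases hb : pvLoopB (pvRuns pattern.toList) false false [] with
    | none => rfl
    | some v => rw [ha, hb] at h; exact absurd h (by cases v with | mk a b => cases b; simp [pvRelO])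
  | some v =>
    obtain ⟨s1, m1, p1⟩ := v
    cases hb : pvLoopB (pvRuns pattern.toList) false false [] with
    | none => rw [ha, hb] at h; exact absurd h (by simp [pvRelO])
    | some w =>
      obtain ⟨s2, m2, p2⟩ := w
      rw [ha, hb] at h
      obtain ⟨hs, hm, hf, he⟩ := h
      subst hs hm
      simp only
      by_cases hu : (s1 || m1) = true
      · rw [if_pos hu, if_pos hu]
      · rw [if_neg hu, if_neg hu]
        by_cases hp : p1 = []
        · rw [if_pos (by simp [hp]), if_pos (by simp [he.mp hp])]
        · rw [if_neg (by simp [hp]), if_neg (by simp; exact fun e => hp (he.mpr e)), hf]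

-- ===== VERDICT (by name: the statement is the Claim_ definition above) =====
theorem parse_format_pattern_spec : Claim_equal_parse_format_pattern := by
  intro pattern _ _
  unfold Spec_parse_format_pattern
  exact ports_agree pattern
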